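-- pv_equiv track=rewrite | github.com/MagikSt1ck/github-slideshow | I3DCP_final.py | sum_layer
-- ===== SOURCE A (Python) =====
-- p_Data=[[-406,23,277],
--         [-403,108,256],
--         [-392,66,236],
--         [-494,18,204],
--         [-467,103,204],
--         [-447,62,190],
--         [-486,144,190],
--         [-490,193,190],
--         [-715,-208,147],
--         [-689,-170,147],
--         [-635,0,146],
--         [-648,182,146],
--         [-447,62,102],
--         [-486,144,102],
--         [-490,193,102],
--         [-494,18,89],
--         [-467,103,88],
--         [-392,66,56],
--         [-403,108,36],
--         [-406,23,16]]
--
-- def sum_layer(input_seq):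
--     """
--     Number of sequence stratification
--     """
--     layer_num = 0
--     for i in range(len(input_seq)):
--         if i+1 == len(input_seq):
--             break
--         else:
--             node = input_seq[i]
--             next_node = input_seq[i+1]
--             if node in p_Data and next_node not in p_Data:
--                 layer_num += 1
--     return layer_num
-- ===== SOURCE B (Python) =====
-- p_Data=[[-406,23,277],
--         [-403,108,256],
--         [-392,66,236],
--         [-494,18,204],
--         [-467,103,204],
--         [-447,62,190],
--         [-486,144,190],
--         [-490,193,190],
--         [-715,-208,147],
--         [-689,-170,147],
--         [-635,0,146],
--         [-648,182,146],
--         [-447,62,102],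
--         [-486,144,102],
--         [-490,193,102],
--         [-494,18,89],
--         [-467,103,88],
--         [-392,66,56],
--         [-403,108,36],
--         [-406,23,16]]
--
-- def sum_layer(input_seq):
--     """
--     Number of sequence stratification
--     """
--     # Run-length encode the membership sequence: one boolean per maximal run.
--     runs = []
--     prev = None
--     for x in input_seq:
--         b = x in p_Data
--         if b != prev:
--             runs.append(b)
--             prev = b
--     # Every maximal member-run is followed by a non-member, except a run that
--     # ends the sequence; so transitions = #member-runs - [last run is a member-run].
--     return runs.count(True) - (1 if runs and runs[-1] else 0)
-- ===== Notes on version B (the rewrite author's own statement) =====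
-- stated objective: alternative
-- what changed: Instead of counting adjacent in/out pairs, B run-length encodes the membership sequence into one boolean per maximal run and returns the closed formula #member-runs minus one if the last run is a member-run.
import Mathlib
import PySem

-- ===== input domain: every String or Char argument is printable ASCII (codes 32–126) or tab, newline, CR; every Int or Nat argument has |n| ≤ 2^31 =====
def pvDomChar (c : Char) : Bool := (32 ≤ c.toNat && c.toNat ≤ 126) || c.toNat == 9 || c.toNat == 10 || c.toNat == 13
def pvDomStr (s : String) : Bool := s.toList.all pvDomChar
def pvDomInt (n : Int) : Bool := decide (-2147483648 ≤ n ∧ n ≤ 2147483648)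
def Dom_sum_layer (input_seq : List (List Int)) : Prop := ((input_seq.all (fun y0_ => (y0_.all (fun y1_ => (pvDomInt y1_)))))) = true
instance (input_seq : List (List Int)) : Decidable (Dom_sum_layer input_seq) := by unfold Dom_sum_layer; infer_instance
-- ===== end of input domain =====

-- B replaces A's adjacent-pair transition counting by run-length encoding the
-- membership sequence and the closed formula #member-runs − [last run is a member-run].

-- the module-level constant p_Data
def pData : List (List Int) :=
  [[-406,23,277],[-403,108,256],[-392,66,236],[-494,18,204],[-467,103,204],
   [-447,62,190],[-486,144,190],[-490,193,190],[-715,-208,147],[-689,-170,147],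
   [-635,0,146],[-648,182,146],[-447,62,102],[-486,144,102],[-490,193,102],
   [-494,18,89],[-467,103,88],[-392,66,56],[-403,108,36],[-406,23,16]]

-- ===== PORT A =====
-- the 'for i in range(len(input_seq))' loop with its break; indices are always in
-- range here, so pyGet? is defaulted with [] (never taken)
def sumLayerGo (xs : List (List Int)) (i : Nat) (layer_num : Int) : Int :=
  if i < xs.length then
    if i + 1 = xs.length then layer_num
    else
      let node := (PySem.List.pyGet? xs (i : Int)).getD []
      let next_node := (PySem.List.pyGet? xs ((i : Int) + 1)).getD []
      sumLayerGo xs (i + 1)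
        (if node ∈ pData ∧ next_node ∉ pData then layer_num + 1 else layer_num)
  else layer_num
termination_by xs.length - i

def sum_layer (input_seq : List (List Int)) : Int := sumLayerGo input_seq 0 0

-- ===== PORT B =====
-- B's loop over input_seq building the run list; prev's sentinel None → Option.none
def sum_layer_alt (input_seq : List (List Int)) : Int :=
  let st := input_seq.foldl
    (fun (st : List Bool × Option Bool) x =>
      let b := decide (x ∈ pData)
      if some b ≠ st.2 then (st.1 ++ [b], some b) else st)
    ([], none)
  let runs := st.1
  ((runs.count true : Nat) : Int) - (if runs.getLast? = some true then 1 else 0)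

-- ===== PRECONDITION & SPEC =====
def Spec_sum_layer (input_seq : List (List Int)) (out : Int) : Prop := out = sum_layer_alt input_seq
instance (input_seq : List (List Int)) (out : Int) : Decidable (Spec_sum_layer input_seq out) := by unfold Spec_sum_layer; infer_instance

-- ===== CLAIM (what is proved, stated in full; the proofs are below) =====
def Claim_equal_sum_layer : Prop := ∀ (input_seq : List (List Int)), Dom_sum_layer input_seq → Spec_sum_layer input_seq (sum_layer input_seq)

-- ===== LEMMAS AND PROOFS =====

-- reference: count of adjacent in→out transitions over the raw list
def countAdj : List (List Int) → Int
  | x :: y :: t => (if x ∈ pData ∧ y ∉ pData then 1 else 0) + countAdj (y :: t)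
  | _ => 0

-- the same count over the boolean membership sequence
def transB : List Bool → Int
  | a :: b :: t => (if a && !b then 1 else 0) + transB (b :: t)
  | _ => 0

-- functional form of B's run-building loop
def runsFrom (p : Option Bool) : List Bool → List Bool
  | [] => []
  | b :: t => if some b = p then runsFrom p t else b :: runsFrom (some b) t

theorem countAdj_eq_transB (xs : List (List Int)) :
    countAdj xs = transB (xs.map (fun x => decide (x ∈ pData))) := by
  induction xs with
  | nil => simp [countAdj, transB]
  | cons x t ih =>
    cases t with
    | nil => simp [countAdj, transB]
    | cons y t =>
      simp only [countAdj, List.map_cons, transB]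
      rw [ih]
      by_cases hx : x ∈ pData <;> by_cases hy : y ∈ pData <;> simp [hx, hy]

theorem go_eq_countAdj (k : Nat) (xs : List (List Int)) (i : Nat) (acc : Int)
    (hk : xs.length - i = k) : sumLayerGo xs i acc = acc + countAdj (xs.drop i) := by
  induction k generalizing i acc with
  | zero =>
    have hle : xs.length ≤ i := by omega
    rw [sumLayerGo]
    simp [Nat.not_lt.mpr hle, List.drop_eq_nil_of_le hle, countAdj]
  | succ k ih =>
    have hi : i < xs.length := by omega
    have hdrop : xs.drop i = xs[i] :: xs.drop (i + 1) := List.drop_eq_getElem_cons hi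
    rw [sumLayerGo]
    by_cases hlast : i + 1 = xs.length
    · have : xs.drop (i + 1) = [] := List.drop_eq_nil_of_le (by omega)
      rw [hdrop, this]
      simp [hi, hlast, countAdj]
    · have hi1 : i + 1 < xs.length := by omega
      have hdrop1 : xs.drop (i + 1) = xs[i + 1] :: xs.drop (i + 2) :=
        List.drop_eq_getElem_cons hi1
      have hget : (PySem.List.pyGet? xs (i : Int)).getD [] = xs[i] := by
        simp [PySem.List.pyGet?_natCast, List.getElem?_eq_getElem hi]
      have hget1 : (PySem.List.pyGet? xs ((i : Int) + 1)).getD [] = xs[i + 1] := by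
        have : ((i : Int) + 1) = ((i + 1 : Nat) : Int) := by push_cast; ring
        rw [this]
        simp only [PySem.List.pyGet?_natCast, List.getElem?_eq_getElem hi1, Option.getD_some]
      simp only [hi, if_pos, hlast, hget, hget1, if_false]
      rw [ih (i + 1) _ (by omega)]
      rw [hdrop, hdrop1, countAdj, ← hdrop1]
      split_ifs <;> ring

-- B's foldl builds rs ++ runsFrom p (membership map)
theorem foldl_runs (xs : List (List Int)) (rs : List Bool) (p : Option Bool) :
    (xs.foldl (fun (st : List Bool × Option Bool) x =>
        let b := decide (x ∈ pData)
        if some b ≠ st.2 then (st.1 ++ [b], some b) else st) (rs, p)).1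
      = rs ++ runsFrom p (xs.map (fun x => decide (x ∈ pData))) := by
  induction xs generalizing rs p with
  | nil => simp [runsFrom]
  | cons x t ih =>
    simp only [List.foldl_cons, List.map_cons, runsFrom]
    by_cases h : some (decide (x ∈ pData)) = p
    · rw [if_pos h]
      simpa [h] using ih rs p
    · rw [if_neg h]
      simpa [h, List.append_assoc] using ih (rs ++ [decide (x ∈ pData)]) (some (decide (x ∈ pData)))

-- the last run carries the value of the last element
theorem runsFrom_getLast (bs : List Bool) (a : Bool) :
    (a :: runsFrom (some a) bs).getLast? = (a :: bs).getLast? := by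
  induction bs generalizing a with
  | nil => simp [runsFrom]
  | cons b t ih =>
    simp only [runsFrom]
    by_cases h : b = a
    · subst h
      rw [if_pos rfl, ih]
      simp [List.getLast?_cons_cons]
    · rw [if_neg (by simp [h])]
      rw [List.getLast?_cons_cons, List.getLast?_cons_cons]
      exact ih b

-- key: #true runs starting after a run valued a = transitions + trailing adjustment
theorem runs_count_key (t : List Bool) (a : Bool) :
    (if a then (1:Int) else 0) + ((runsFrom (some a) t).count true : Int)
      = transB (a :: t) + (if (a :: t).getLast? = some true then 1 else 0) := by
  induction t generalizing a with
  | nil =>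
    cases a <;> simp [runsFrom, transB]
  | cons b t ih =>
    by_cases h : b = a
    · subst h
      simp only [runsFrom, transB, if_true]
      rw [ih]
      have : (b :: b :: t).getLast? = (b :: t).getLast? := List.getLast?_cons_cons ..
      rw [this]
      cases b <;> simp
    · simp only [runsFrom, transB]
      have hne : ¬ (some b = some a) := by simpa using h
      rw [if_neg hne]
      have hlast : (a :: b :: t).getLast? = (b :: t).getLast? := List.getLast?_cons_cons ..
      rw [hlast, List.count_cons]
      have hib := ih b
      push_cast
      cases a <;> cases b <;> simp_all <;> omega

-- ===== VERDICT (by name: the statement is the Claim_ definition above) =====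
theorem sum_layer_spec : Claim_equal_sum_layer := by
  intro xs _
  unfold Spec_sum_layer sum_layer sum_layer_alt
  rw [go_eq_countAdj (xs.length) xs 0 0 (by omega)]
  simp only [List.drop_zero, zero_add]
  rw [countAdj_eq_transB, foldl_runs, List.nil_append]
  generalize xs.map (fun x => decide (x ∈ pData)) = bs
  cases bs with
  | nil => simp [runsFrom, transB]
  | cons b t =>
    rw [show runsFrom none (b :: t) = b :: runsFrom (some b) t from by simp [runsFrom]]
    have hk := runs_count_key t b
    have hl := runsFrom_getLast t b
    rw [hl, List.count_cons]
    push_cast at *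
    cases b <;> simp_all <;> omega
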